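-- pv_equiv track=rewrite | github.com/pypi-data/pypi-mirror-137 | packages/contester-cm/contester_cm-0.14-py3-none-any.whl/src/prepare_md.py | __read_sup
-- ===== SOURCE A (Python) =====
-- def __read_sup(index, data):
--     result = ""
--
--     if index < len(data) and data[index] != "^":
--         return index, result
--
--     index += 2
--     result = "<sup>"
--
--     while index < len(data) and data[index] != "]":
--
--         ans = __read_sup(index, data)
--
--         index = ans[0]
--         result += ans[1]
--
--         if index < len(data) and data[index] != "]":
--             result += data[index]
--             index += 1
--
--     result += "</sup>"
--     index += 1
--
--     return index, result
-- ===== SOURCE B (Python) =====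
-- def __read_sup(index, data):
--     # Iterative re-implementation: explicit stack of open <sup> buffers
--     # instead of recursion. Same return value as the recursive original.
--     n = len(data)
--     if index < n and data[index] != "^":
--         return index, ""
--     stack = []
--     cur = "<sup>"
--     index += 2
--     while True:
--         if index < n and data[index] != "]":
--             c = data[index]
--             if c == "^":
--                 stack.append(cur)
--                 cur = "<sup>"
--                 index += 2
--             else:
--                 cur += c
--                 index += 1
--         else:
--             cur += "</sup>"
--             index += 1
--             if not stack:
--                 return index, cur
--             cur = stack.pop() + cur
--             if index < n and data[index] != "]":
--                 cur += data[index]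
--                 index += 1
-- ===== Notes on version B (the rewrite author's own statement) =====
-- stated objective: alternative
-- what changed: The recursive-descent parser is replaced by a single flat loop over the index with an explicit stack of open <sup> buffers (no recursion); Pre_ excludes only the inputs (index < -len(data)) on which both A and B raise IndexError.
import Mathlib
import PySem

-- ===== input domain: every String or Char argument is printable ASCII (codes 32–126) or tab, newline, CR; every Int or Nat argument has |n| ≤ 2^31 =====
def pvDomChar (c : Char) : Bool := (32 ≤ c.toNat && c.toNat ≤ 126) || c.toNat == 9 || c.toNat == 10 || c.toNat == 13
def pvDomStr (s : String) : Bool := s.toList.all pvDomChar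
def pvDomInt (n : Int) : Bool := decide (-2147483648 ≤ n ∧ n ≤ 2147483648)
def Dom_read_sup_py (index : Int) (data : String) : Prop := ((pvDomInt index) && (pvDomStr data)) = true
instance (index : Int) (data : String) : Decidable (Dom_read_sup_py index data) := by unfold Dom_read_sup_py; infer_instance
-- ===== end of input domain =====

-- B replaces the recursive-descent parser by a single flat loop with an explicit stack of open <sup> buffers (alternative decomposition, same values).


-- data[i] for a possibly negative Python index; the default ' ' is only reachable
-- when Python raises IndexError (index < -len(data)), which Pre_ excludes.
def pvGetC (s : List Char) (i : Int) : Char := (PySem.List.pyGet? s i).getD ' '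

-- ===== PORT A =====
-- A is a recursive parser with a while loop; the loop and the recursion are ported
-- mutually, totalised by a fuel counter (a guard only: pvFuelA is proved sufficient
-- below, so fuel exhaustion is unreachable on every input).
mutual
def readA (s : List Char) : Nat → Int → Option (Int × List Char)
  | 0, _ => none
  | fuel+1, index =>
    if index < (s.length : Int) ∧ pvGetC s index ≠ '^' then some (index, ([] : List Char))
    else loopA s fuel (index + 2) "<sup>".toList
def loopA (s : List Char) : Nat → Int → List Char → Option (Int × List Char)
  | 0, _, _ => none
  | fuel+1, index, acc =>
    if index < (s.length : Int) ∧ pvGetC s index ≠ ']' then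
      match readA s fuel index with
      | none => none
      | some (i1, r1) =>
        let acc1 := acc ++ r1
        if i1 < (s.length : Int) ∧ pvGetC s i1 ≠ ']' then
          loopA s fuel (i1 + 1) (acc1 ++ [pvGetC s i1])
        else
          loopA s fuel i1 acc1
    else some (index + 1, acc ++ "</sup>".toList)
end

def pvFuelA (index : Int) (s : List Char) : Nat := 2 * ((s.length : Int) - index).toNat + 4

def read_sup_py (index : Int) (data : String) : Int × String :=
  match readA data.toList (pvFuelA index data.toList) index with
  | some (i, r) => (i, String.ofList r)
  | none => (index, "")   -- unreachable (fuel sufficiency is proved below)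

-- ===== PORT B =====
-- Source B's flat loop: `cur` is the open buffer, `stack` the buffers of enclosing <sup>
-- blocks; totalised by a fuel counter (a guard only: pvFuelB is proved sufficient
-- below, so fuel exhaustion is unreachable on every input).
def loopB (s : List Char) : Nat → Int → List Char → List (List Char) → Option (Int × List Char)
  | 0, _, _, _ => none
  | fuel+1, index, cur, stack =>
    if index < (s.length : Int) ∧ pvGetC s index ≠ ']' then
      if pvGetC s index = '^' then
        loopB s fuel (index + 2) "<sup>".toList (cur :: stack)
      else
        loopB s fuel (index + 1) (cur ++ [pvGetC s index]) stack
    else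
      let cur1 := cur ++ "</sup>".toList
      let i1 := index + 1
      match stack with
      | [] => some (i1, cur1)
      | p :: rest =>
        if i1 < (s.length : Int) ∧ pvGetC s i1 ≠ ']' then
          loopB s fuel (i1 + 1) ((p ++ cur1) ++ [pvGetC s i1]) rest
        else
          loopB s fuel i1 (p ++ cur1) rest

def pvFuelB (index : Int) (s : List Char) : Nat := 2 * ((s.length : Int) - index).toNat + 6

def read_sup_py_alt (index : Int) (data : String) : Int × String :=
  let s := data.toList
  if index < (s.length : Int) ∧ pvGetC s index ≠ '^' then (index, "")
  else
    match loopB s (pvFuelB (index + 2) s) (index + 2) "<sup>".toList [] with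
    | some p => (p.1, String.ofList p.2)
    | none => (index, "")   -- unreachable (fuel sufficiency is proved below)

-- ===== PRECONDITION & SPEC =====
-- Pre_ excludes exactly the inputs where the Python A raises IndexError: index < -len(data)
-- (the first subscript data[index] is then out of range even after Python's negative wraparound).
def Pre_read_sup_py (index : Int) (data : String) : Prop := -(PySem.Str.len data) ≤ index
instance (index : Int) (data : String) : Decidable (Pre_read_sup_py index data) := by unfold Pre_read_sup_py; infer_instance

def pvWitness_read_sup_py : Int × String := (0, "^ab]c")

def Spec_read_sup_py (index : Int) (data : String) (out : Int × String) : Prop := out = read_sup_py_alt index data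
instance (index : Int) (data : String) (out : Int × String) : Decidable (Spec_read_sup_py index data out) := by unfold Spec_read_sup_py; infer_instance

-- ===== CLAIM (what is proved, stated in full; the proofs are below) =====
def Claim_equal_read_sup_py : Prop := ∀ (index : Int) (data : String), Dom_read_sup_py index data → Pre_read_sup_py index data → Spec_read_sup_py index data (read_sup_py index data)

-- ===== LEMMAS AND PROOFS =====

-- B's loop converges from this state to `out` (with some fuel)
def ConvB (s : List Char) (index : Int) (cur : List Char) (stack : List (List Char)) (out : Int × List Char) : Prop :=
  ∃ fuel, loopB s fuel index cur stack = some out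

-- B's continuation after the current frame closes at (i, r) with `stack` still open
def KRel (s : List Char) (i : Int) (r : List Char) (stack : List (List Char)) (out : Int × List Char) : Prop :=
  match stack with
  | [] => out = (i, r)
  | p :: rest =>
    if i < (s.length : Int) ∧ pvGetC s i ≠ ']' then
      ConvB s (i + 1) ((p ++ r) ++ [pvGetC s i]) rest out
    else
      ConvB s i (p ++ r) rest out

-- result indices move forward
lemma idxA (s : List Char) : ∀ fuel : Nat,
    (∀ index i1 r1, readA s fuel index = some (i1, r1) → i1 = index ∨ index + 3 ≤ i1) ∧
    (∀ index acc i1 r1, loopA s fuel index acc = some (i1, r1) → index + 1 ≤ i1) := by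
  intro fuel
  induction fuel with
  | zero => constructor <;> intro _ <;> intros <;> simp [readA, loopA] at *
  | succ f ih =>
    constructor
    · intro index i1 r1 h
      rw [readA] at h
      by_cases hg : index < (s.length : Int) ∧ pvGetC s index ≠ '^'
      · rw [if_pos hg] at h; cases h; left; rfl
      · rw [if_neg hg] at h
        right
        have := ih.2 (index + 2) "<sup>".toList i1 r1 h
        omega
    · intro index acc i1 r1 h
      rw [loopA] at h
      by_cases hg : index < (s.length : Int) ∧ pvGetC s index ≠ ']'
      · rw [if_pos hg] at h
        cases hr : readA s f index with
        | none => rw [hr] at h; simp at h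
        | some p =>
          obtain ⟨i0, r0⟩ := p
          rw [hr] at h
          simp only at h
          have h0 := ih.1 index i0 r0 hr
          by_cases hf : i0 < (s.length : Int) ∧ pvGetC s i0 ≠ ']'
          · rw [if_pos hf] at h
            have := ih.2 (i0 + 1) (acc ++ r0 ++ [pvGetC s i0]) i1 r1 h
            omega
          · rw [if_neg hf] at h
            have := ih.2 i0 (acc ++ r0) i1 r1 h
            -- i0 = index is impossible: the loop guard hg would make hf true
            rcases h0 with h0 | h0
            · exact absurd (h0 ▸ hg) hf
            · omega
      · rw [if_neg hg] at h; cases h; omega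

-- fuel sufficiency for A's port
lemma suffA (s : List Char) : ∀ fuel : Nat,
    (∀ index : Int, 2 * ((s.length : Int) - index).toNat + 4 ≤ fuel → (readA s fuel index).isSome) ∧
    (∀ (index : Int) (acc : List Char), 2 * ((s.length : Int) - index).toNat + 2 ≤ fuel → (loopA s fuel index acc).isSome) := by
  intro fuel
  induction fuel using Nat.strong_induction_on with
  | _ fuel ih =>
    constructor
    · intro index hle
      obtain ⟨f, rfl⟩ : ∃ f, fuel = f + 1 := ⟨fuel - 1, by omega⟩
      rw [readA]
      by_cases hg : index < (s.length : Int) ∧ pvGetC s index ≠ '^'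
      · rw [if_pos hg]; rfl
      · rw [if_neg hg]
        exact (ih f (by omega)).2 (index + 2) _ (by omega)
    · intro index acc hle
      obtain ⟨f, rfl⟩ : ∃ f, fuel = f + 1 := ⟨fuel - 1, by omega⟩
      rw [loopA]
      by_cases hg : index < (s.length : Int) ∧ pvGetC s index ≠ ']'
      · rw [if_pos hg]
        by_cases hc : pvGetC s index = '^'
        · obtain ⟨g, rfl⟩ : ∃ g, f = g + 1 := ⟨f - 1, by omega⟩
          have hloop : (loopA s g (index + 2) "<sup>".toList).isSome :=
            (ih g (by omega)).2 (index + 2) _ (by omega)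
          have hread : readA s (g + 1) index = loopA s g (index + 2) "<sup>".toList := by
            rw [readA, if_neg (by simp [hc])]
          rw [hread]
          cases hr : loopA s g (index + 2) "<sup>".toList with
          | none => rw [hr] at hloop; simp at hloop
          | some p =>
            obtain ⟨i0, r0⟩ := p
            have hi0 := (idxA s g).2 _ _ _ _ hr
            simp only
            by_cases hf : i0 < (s.length : Int) ∧ pvGetC s i0 ≠ ']'
            · rw [if_pos hf]
              exact (ih (g + 1) (by omega)).2 (i0 + 1) _ (by omega)
            · rw [if_neg hf]
              exact (ih (g + 1) (by omega)).2 i0 _ (by omega)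
        · obtain ⟨g, rfl⟩ : ∃ g, f = g + 1 := ⟨f - 1, by omega⟩
          have hread : readA s (g + 1) index = some (index, ([] : List Char)) := by
            rw [readA, if_pos ⟨hg.1, by simp [hc]⟩]
          rw [hread]
          simp only
          rw [if_pos hg]
          exact (ih (g + 1) (by omega)).2 (index + 1) _ (by omega)
      · rw [if_neg hg]; rfl

-- fuel monotonicity for B's loop
lemma monoB (s : List Char) : ∀ (f g : Nat) (index : Int) (cur : List Char) (stack : List (List Char)) (out : Int × List Char),
    f ≤ g → loopB s f index cur stack = some out → loopB s g index cur stack = some out := by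
  intro f
  induction f with
  | zero => intro g index cur stack out _ h; simp [loopB] at h
  | succ f ih =>
    intro g index cur stack out hle h
    obtain ⟨g', rfl⟩ : ∃ g', g = g' + 1 := ⟨g - 1, by omega⟩
    rw [loopB] at h
    rw [loopB]
    by_cases hg : index < (s.length : Int) ∧ pvGetC s index ≠ ']'
    · rw [if_pos hg] at h; rw [if_pos hg]
      by_cases hc : pvGetC s index = '^'
      · rw [if_pos hc] at h; rw [if_pos hc]
        exact ih g' _ _ _ _ (by omega) h
      · rw [if_neg hc] at h; rw [if_neg hc]
        exact ih g' _ _ _ _ (by omega) h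
    · rw [if_neg hg] at h; rw [if_neg hg]
      cases stack with
      | nil => exact h
      | cons p rest =>
        simp only at h ⊢
        by_cases hf : index + 1 < (s.length : Int) ∧ pvGetC s (index + 1) ≠ ']'
        · rw [if_pos hf] at h; rw [if_pos hf]
          exact ih g' _ _ _ _ (by omega) h
        · rw [if_neg hf] at h; rw [if_neg hf]
          exact ih g' _ _ _ _ (by omega) h

-- fuel sufficiency for B's loop
lemma suffB (s : List Char) : ∀ (fuel : Nat) (index : Int) (cur : List Char) (stack : List (List Char)),
    2 * ((s.length : Int) - index).toNat + stack.length + 2 ≤ fuel → (loopB s fuel index cur stack).isSome := by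
  intro fuel
  induction fuel using Nat.strong_induction_on with
  | _ fuel ih =>
    intro index cur stack hle
    obtain ⟨f, rfl⟩ : ∃ f, fuel = f + 1 := ⟨fuel - 1, by omega⟩
    rw [loopB]
    by_cases hg : index < (s.length : Int) ∧ pvGetC s index ≠ ']'
    · rw [if_pos hg]
      by_cases hc : pvGetC s index = '^'
      · rw [if_pos hc]
        exact ih f (by omega) (index + 2) _ (cur :: stack) (by simp only [List.length_cons]; omega)
      · rw [if_neg hc]
        exact ih f (by omega) (index + 1) _ stack (by omega)
    · rw [if_neg hg]
      cases stack with
      | nil => rfl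
      | cons p rest =>
        simp only [List.length_cons] at hle
        simp only
        by_cases hf : index + 1 < (s.length : Int) ∧ pvGetC s (index + 1) ≠ ']'
        · rw [if_pos hf]
          exact ih f (by omega) (index + 1 + 1) _ rest (by omega)
        · rw [if_neg hf]
          exact ih f (by omega) (index + 1) _ rest (by omega)

-- MAIN: if A's loop closes the current frame at (i1, r1) and B's continuation from there
-- reaches `out`, then B's loop reaches `out` from the matching state
lemma mainAB (s : List Char) : ∀ fuel : Nat, ∀ (index : Int) (acc : List Char) (i1 : Int) (r1 : List Char),
    loopA s fuel index acc = some (i1, r1) →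
    ∀ (stack : List (List Char)) (out : Int × List Char),
      KRel s i1 r1 stack out → ConvB s index acc stack out := by
  intro fuel
  induction fuel using Nat.strong_induction_on with
  | _ fuel ih =>
    intro index acc i1 r1 h stack out hK
    obtain ⟨f, rfl⟩ : ∃ f, fuel = f + 1 := by
      rcases fuel with _ | f
      · simp [loopA] at h
      · exact ⟨f, rfl⟩
    rw [loopA] at h
    by_cases hg : index < (s.length : Int) ∧ pvGetC s index ≠ ']'
    · rw [if_pos hg] at h
      by_cases hc : pvGetC s index = '^'
      · -- nested block
        obtain ⟨g, rfl⟩ : ∃ g, f = g + 1 := by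
          rcases f with _ | g
          · simp [readA] at h
          · exact ⟨g, rfl⟩
        have hread : readA s (g + 1) index = loopA s g (index + 2) "<sup>".toList := by
          rw [readA, if_neg (by simp [hc])]
        rw [hread] at h
        cases hr : loopA s g (index + 2) "<sup>".toList with
        | none => rw [hr] at h; simp at h
        | some p =>
          obtain ⟨i0, r0⟩ := p
          rw [hr] at h
          simp only at h
          -- the continuation of the parent loop after the nested block
          have hcont : KRel s i0 r0 (acc :: stack) out := by
            show if i0 < (s.length : Int) ∧ pvGetC s i0 ≠ ']' then
                ConvB s (i0 + 1) (acc ++ r0 ++ [pvGetC s i0]) stack out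
              else ConvB s i0 (acc ++ r0) stack out
            by_cases hf : i0 < (s.length : Int) ∧ pvGetC s i0 ≠ ']'
            · rw [if_pos hf]
              rw [if_pos hf] at h
              exact ih (g + 1) (by omega) _ _ _ _ h stack out hK
            · rw [if_neg hf]
              rw [if_neg hf] at h
              exact ih (g + 1) (by omega) _ _ _ _ h stack out hK
          obtain ⟨bf, hbf⟩ := ih g (by omega) (index + 2) "<sup>".toList i0 r0 hr (acc :: stack) out hcont
          exact ⟨bf + 1, by rw [loopB, if_pos hg, if_pos hc]; exact hbf⟩
      · -- plain character
        obtain ⟨g, rfl⟩ : ∃ g, f = g + 1 := by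
          rcases f with _ | g
          · simp [readA] at h
          · exact ⟨g, rfl⟩
        have hread : readA s (g + 1) index = some (index, ([] : List Char)) := by
          rw [readA, if_pos ⟨hg.1, by simp [hc]⟩]
        rw [hread] at h
        simp only at h
        rw [if_pos hg, List.append_nil] at h
        obtain ⟨bf, hbf⟩ := ih (g + 1) (by omega) _ _ _ _ h stack out hK
        exact ⟨bf + 1, by rw [loopB, if_pos hg, if_neg hc]; exact hbf⟩
    · -- current frame closes here: i1 = index + 1, r1 = acc ++ "</sup>"
      rw [if_neg hg] at h
      cases h
      cases stack with
      | nil =>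
        have hK' : out = (index + 1, acc ++ "</sup>".toList) := hK
        exact ⟨1, by rw [loopB, if_neg hg]; rw [hK']⟩
      | cons p rest =>
        have hK' : (if index + 1 < (s.length : Int) ∧ pvGetC s (index + 1) ≠ ']' then
              ConvB s (index + 1 + 1) (p ++ (acc ++ "</sup>".toList) ++ [pvGetC s (index + 1)]) rest out
            else ConvB s (index + 1) (p ++ (acc ++ "</sup>".toList)) rest out) := hK
        by_cases hf : index + 1 < (s.length : Int) ∧ pvGetC s (index + 1) ≠ ']'
        · rw [if_pos hf] at hK'
          obtain ⟨bf, hbf⟩ := hK'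
          exact ⟨bf + 1, by rw [loopB, if_neg hg]; simp only; rw [if_pos hf]; exact hbf⟩
        · rw [if_neg hf] at hK'
          obtain ⟨bf, hbf⟩ := hK'
          exact ⟨bf + 1, by rw [loopB, if_neg hg]; simp only; rw [if_neg hf]; exact hbf⟩

-- ===== VERDICT (by name: the statement is the Claim_ definition above) =====
theorem read_sup_py_spec : Claim_equal_read_sup_py := by
  intro index data _ _
  unfold Spec_read_sup_py read_sup_py read_sup_py_alt
  set s := data.toList with hs
  by_cases hg : index < (s.length : Int) ∧ pvGetC s index ≠ '^'
  · obtain ⟨f, hf⟩ : ∃ f, pvFuelA index s = f + 1 := ⟨pvFuelA index s - 1, by unfold pvFuelA; omega⟩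
    rw [hf, readA, if_pos hg, if_pos hg]
  · obtain ⟨f, hf⟩ : ∃ f, pvFuelA index s = f + 1 := ⟨pvFuelA index s - 1, by unfold pvFuelA; omega⟩
    have hread : readA s (pvFuelA index s) index = loopA s f (index + 2) "<sup>".toList := by
      rw [hf, readA, if_neg hg]
    have hsome : (loopA s f (index + 2) "<sup>".toList).isSome := by
      apply (suffA s f).2
      have : pvFuelA index s = 2 * ((s.length : Int) - index).toNat + 4 := rfl
      omega
    cases hr : loopA s f (index + 2) "<sup>".toList with
    | none => rw [hr] at hsome; simp at hsome
    | some p =>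
      obtain ⟨i1, r1⟩ := p
      -- B converges to (i1, r1) with some fuel …
      obtain ⟨bf, hbf⟩ := mainAB s f (index + 2) "<sup>".toList i1 r1 hr [] (i1, r1) rfl
      -- … and pvFuelB is enough fuel, so it converges there with pvFuelB
      have hBsome : (loopB s (pvFuelB (index + 2) s) (index + 2) "<sup>".toList []).isSome := by
        apply suffB
        have : pvFuelB (index + 2) s = 2 * ((s.length : Int) - (index + 2)).toNat + 6 := rfl
        simp only [List.length_nil]
        omega
      cases hB : loopB s (pvFuelB (index + 2) s) (index + 2) "<sup>".toList [] with
      | none => rw [hB] at hBsome; simp at hBsome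
      | some q =>
        have : loopB s (max bf (pvFuelB (index + 2) s)) (index + 2) "<sup>".toList [] = some (i1, r1) :=
          monoB s bf _ _ _ _ _ (by omega) hbf
        have hq : q = (i1, r1) := by
          have h2 := monoB s (pvFuelB (index + 2) s) (max bf (pvFuelB (index + 2) s)) _ _ _ _ (by omega) hB
          rw [this] at h2
          exact (Option.some_inj.mp h2).symm
        rw [hread, hr, if_neg hg, hB, hq]
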